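-- pv_equiv track=rewrite | github.com/haebo9/coding-test | 프로그래머스/2/118667. 두 큐 합 같게 만들기/두 큐 합 같게 만들기.py | solution
-- ===== SOURCE A (Python) =====
-- from collections import deque
--
-- def solution(queue1, queue2):
--     q1, q2 = deque(queue1), deque(queue2)
--     q1_total = sum(q1)
--     q2_total = sum(q2)
--     target = ( q1_total + q2_total ) // 2
--     cnt = 0
--
--     while q1 and q2:
--         if q1_total > q2_total: # q1 > q2
--             temp = q1.popleft()
--             q1_total -= temp
--             q2_total += temp
--             q2.append(temp)
--
--         elif q1_total < q2_total: # q1 < q2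
--             temp = q2.popleft()
--             q2_total -= temp
--             q1_total += temp
--             q1.append(temp)
--
--         elif q1 == list(queue1) and q2 == list(queue2): # 순환 발생 시 조기 종료
--             return -1
--
--         elif q1_total == q2_total: # q1 == q2
--             return cnt
--
--         cnt += 1
--         if cnt >= 1000000:
--             return -1
--     else:
--         return -1
-- ===== SOURCE B (Python) =====
-- def solution(queue1, queue2):
--     combined = list(queue1) + list(queue2)
--     n = len(combined)
--     size = len(queue1)
--     if size == 0 or size == n:
--         return -1
--     total = sum(combined)
--     cur = sum(queue1)
--     left = 0
--     cnt = 0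
--     while True:
--         if 2 * cur == total:
--             return cnt
--         if 2 * cur > total:
--             cur -= combined[left % n]
--             left += 1
--             size -= 1
--         else:
--             cur += combined[(left + size) % n]
--             size += 1
--         cnt += 1
--         if cnt >= 1000000 or size == 0 or size == n:
--             return -1
-- ===== Notes on version B (the rewrite author's own statement) =====
-- stated objective: alternative
-- what changed: Replaces the two mutated deques by a single immutable combined list with a circular window tracked via a left index, a window size and one running sum, making the same greedy moves by index arithmetic instead of popleft/append.
import Mathlib
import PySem

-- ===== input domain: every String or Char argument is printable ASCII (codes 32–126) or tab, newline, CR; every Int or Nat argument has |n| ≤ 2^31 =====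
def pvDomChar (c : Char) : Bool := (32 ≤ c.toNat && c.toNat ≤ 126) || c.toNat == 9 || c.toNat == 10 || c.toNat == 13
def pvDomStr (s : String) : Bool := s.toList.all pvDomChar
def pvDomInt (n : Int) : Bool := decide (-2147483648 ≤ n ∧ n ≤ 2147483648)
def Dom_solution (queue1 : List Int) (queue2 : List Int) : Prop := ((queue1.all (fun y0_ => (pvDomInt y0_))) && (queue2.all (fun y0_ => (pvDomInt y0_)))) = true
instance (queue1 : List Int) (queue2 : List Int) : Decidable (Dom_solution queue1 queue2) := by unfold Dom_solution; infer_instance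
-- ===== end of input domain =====

-- B replaces A's two mutated deques by one combined immutable list with a circular
-- window (left index + window size + one running sum); same greedy moves, alternative structure.


-- ===== PORT A =====
-- A's while loop: each iteration either returns or increments cnt, and cnt ≥ 1000000
-- returns -1, so at most 1000000 iterations run; fuel = 1000000 - cnt is a pure
-- termination token (the fuel-0 branch is unreachable).
def solutionLoopA : Nat → List Int → List Int → Int → Int → Int → Int
  | 0, _, _, _, _, _ => -1
  | fuel + 1, q1, q2, t1, t2, cnt =>
    match q1, q2 with
    | [], _ => -1                       -- while condition fails: 'else: return -1'
    | _, [] => -1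
    | a :: q1', b :: q2' =>
      if t1 > t2 then
        if cnt + 1 ≥ 1000000 then -1
        else solutionLoopA fuel q1' ((b :: q2') ++ [a]) (t1 - a) (t2 + a) (cnt + 1)
      else if t1 < t2 then
        if cnt + 1 ≥ 1000000 then -1
        else solutionLoopA fuel ((a :: q1') ++ [b]) q2' (t1 + b) (t2 - b) (cnt + 1)
      -- Python's cycle-check branch compares a deque with a list, which is always
      -- False in Python, so that elif is never taken (exact).
      else if t1 = t2 then cnt
      else                               -- unreachable fall-through (trichotomy)
        if cnt + 1 ≥ 1000000 then -1
        else solutionLoopA fuel (a :: q1') (b :: q2') t1 t2 (cnt + 1)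

def solution (queue1 : List Int) (queue2 : List Int) : Int :=
  let t1 := queue1.sum
  let t2 := queue2.sum
  let _target := PySem.Int.floordiv (t1 + t2) 2   -- computed by A but never used
  solutionLoopA 1000000 queue1 queue2 t1 t2 0

-- ===== PORT B =====
-- Source B's 'while True' loop; the post-move check 'cnt >= 1000000 or size == 0 or
-- size == n' is written once per branch with that branch's updated size.
-- Indices are always taken mod n with 0 < n, so getD is exact for combined[i].
def solutionLoopB (c : List Int) (n : Nat) (total : Int) :
    Nat → Nat → Nat → Int → Int → Int
  | 0, _, _, _, _ => -1
  | fuel + 1, left, size, cur, cnt =>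
    if 2 * cur = total then cnt
    else if 2 * cur > total then
      if cnt + 1 ≥ 1000000 ∨ size - 1 = 0 ∨ size - 1 = n then -1
      else solutionLoopB c n total fuel (left + 1) (size - 1) (cur - c.getD (left % n) 0) (cnt + 1)
    else
      if cnt + 1 ≥ 1000000 ∨ size + 1 = 0 ∨ size + 1 = n then -1
      else solutionLoopB c n total fuel left (size + 1) (cur + c.getD ((left + size) % n) 0) (cnt + 1)

def solution_alt (queue1 : List Int) (queue2 : List Int) : Int :=
  let combined := queue1 ++ queue2
  let n := combined.length
  let size := queue1.length
  if size = 0 ∨ size = n then -1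
  else solutionLoopB combined n combined.sum 1000000 0 size queue1.sum 0

-- ===== PRECONDITION & SPEC =====
def Spec_solution (queue1 : List Int) (queue2 : List Int) (out : Int) : Prop := out = solution_alt queue1 queue2
instance (queue1 : List Int) (queue2 : List Int) (out : Int) : Decidable (Spec_solution queue1 queue2 out) := by unfold Spec_solution; infer_instance

-- ===== CLAIM (what is proved, stated in full; the proofs are below) =====
def Claim_equal_solution : Prop := ∀ (queue1 : List Int) (queue2 : List Int), Dom_solution queue1 queue2 → Spec_solution queue1 queue2 (solution queue1 queue2)

-- ===== LEMMAS AND PROOFS =====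

-- circular window of length s starting at l in c
def win (c : List Int) (l s : Nat) : List Int :=
  (List.range s).map (fun i => c.getD ((l + i) % c.length) 0)

lemma win_zero (c : List Int) (l : Nat) : win c l 0 = [] := rfl

lemma win_succ_cons (c : List Int) (l s : Nat) :
    win c l (s + 1) = c.getD (l % c.length) 0 :: win c (l + 1) s := by
  unfold win
  rw [List.range_succ_eq_map, List.map_cons, List.map_map]
  refine congrArg₂ List.cons rfl (List.map_congr_left fun i _ => ?_)
  simp only [Function.comp_apply, Nat.succ_eq_add_one]
  rw [show l + (i + 1) = l + 1 + i by omega]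

lemma win_succ_snoc (c : List Int) (l s : Nat) :
    win c l (s + 1) = win c l s ++ [c.getD ((l + s) % c.length) 0] := by
  simp [win, List.range_succ]

lemma loopA_nil_left (fuel : Nat) (q2 : List Int) (t1 t2 cnt : Int) :
    solutionLoopA fuel [] q2 t1 t2 cnt = -1 := by
  cases fuel <;> rfl

lemma loopA_nil_right (fuel : Nat) (q1 : List Int) (t1 t2 cnt : Int) :
    solutionLoopA fuel q1 [] t1 t2 cnt = -1 := by
  cases fuel <;> cases q1 <;> rfl

-- main invariant: A's loop on the two deques equals B's loop on the circular window
lemma loop_eq (c : List Int) (tot : Int) :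
    ∀ (fuel : Nat) (l s : Nat) (cur cnt : Int),
      0 < s → s < c.length →
      solutionLoopA fuel (win c l s) (win c (l + s) (c.length - s)) cur (tot - cur) cnt
        = solutionLoopB c c.length tot fuel l s cur cnt := by
  intro fuel
  induction fuel with
  | zero => intro l s cur cnt hs hn; rfl
  | succ fuel ih =>
    intro l s cur cnt hs hn
    obtain ⟨s', rfl⟩ : ∃ s', s = s' + 1 := ⟨s - 1, by omega⟩
    obtain ⟨r', hr'⟩ : ∃ r', c.length - (s' + 1) = r' + 1 := ⟨c.length - s' - 2, by omega⟩
    rw [win_succ_cons c l s', hr', win_succ_cons]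
    show (if cur > tot - cur then _ else _) = _
    simp only [solutionLoopB, List.cons_append]
    by_cases heq : 2 * cur = tot
    · have h1 : ¬ (cur > tot - cur) := by omega
      have h2 : ¬ (cur < tot - cur) := by omega
      have h3 : cur = tot - cur := by omega
      rw [if_neg h1, if_neg h2, if_pos h3, if_pos heq]
    · by_cases hgt : 2 * cur > tot
      · have h1 : cur > tot - cur := by omega
        rw [if_pos h1, if_neg heq, if_pos hgt]
        by_cases hcap : cnt + 1 ≥ 1000000
        · rw [if_pos hcap, if_pos (Or.inl hcap)]
        · rw [if_neg hcap]
          by_cases hz : s' = 0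
          · subst hz
            rw [if_pos (by omega : cnt + 1 ≥ 1000000 ∨ (0:Nat) + 1 - 1 = 0 ∨ 0 + 1 - 1 = c.length),
              win_zero, loopA_nil_left]
          · rw [if_neg (by omega : ¬ (cnt + 1 ≥ 1000000 ∨ s' + 1 - 1 = 0 ∨ s' + 1 - 1 = c.length))]
            have hq2 : c.getD ((l + (s' + 1)) % c.length) 0 ::
                (win c (l + (s' + 1) + 1) r' ++ [c.getD (l % c.length) 0])
                = win c (l + 1 + s') (c.length - s') := by
              have e1 : c.getD (l % c.length) 0
                  = c.getD ((l + (s' + 1) + (r' + 1)) % c.length) 0 := by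
                rw [show l + (s' + 1) + (r' + 1) = l + c.length by omega, Nat.add_mod_right]
              rw [e1, ← List.cons_append, ← win_succ_cons, ← win_succ_snoc,
                show l + (s' + 1) = l + 1 + s' by omega,
                show r' + 1 + 1 = c.length - s' by omega]
            have ht2 : tot - cur + c.getD (l % c.length) 0
                = tot - (cur - c.getD (l % c.length) 0) := by ring
            rw [ht2, hq2, show s' + 1 - 1 = s' by omega]
            exact ih (l + 1) s' (cur - c.getD (l % c.length) 0) (cnt + 1) (by omega) (by omega)
      · have h1 : ¬ (cur > tot - cur) := by omega
        have h2 : cur < tot - cur := by omega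
        rw [if_neg h1, if_pos h2, if_neg heq, if_neg hgt]
        by_cases hcap : cnt + 1 ≥ 1000000
        · rw [if_pos hcap, if_pos (Or.inl hcap)]
        · rw [if_neg hcap]
          by_cases hfull : s' + 1 + 1 = c.length
          · have hr0 : r' = 0 := by omega
            subst hr0
            rw [if_pos (Or.inr (Or.inr hfull)), win_zero, loopA_nil_right]
          · rw [if_neg (by omega : ¬ (cnt + 1 ≥ 1000000 ∨ s' + 1 + 1 = 0 ∨ s' + 1 + 1 = c.length))]
            have hq1 : c.getD (l % c.length) 0 ::
                (win c (l + 1) s' ++ [c.getD ((l + (s' + 1)) % c.length) 0])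
                = win c l (s' + 1 + 1) := by
              rw [← List.cons_append, ← win_succ_cons, ← win_succ_snoc]
            have ht2 : tot - cur - c.getD ((l + (s' + 1)) % c.length) 0
                = tot - (cur + c.getD ((l + (s' + 1)) % c.length) 0) := by ring
            have hq2 : win c (l + (s' + 1) + 1) r'
                = win c (l + (s' + 1 + 1)) (c.length - (s' + 1 + 1)) := by
              rw [show l + (s' + 1) + 1 = l + (s' + 1 + 1) by omega,
                show c.length - (s' + 1 + 1) = r' by omega]
            rw [ht2, hq1, hq2]
            exact ih l (s' + 1 + 1) (cur + c.getD ((l + (s' + 1)) % c.length) 0) (cnt + 1)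
              (by omega) (by omega)

lemma win_first (q1 q2 : List Int) :
    win (q1 ++ q2) 0 q1.length = q1 := by
  apply List.ext_getElem
  · simp [win]
  · intro i h1 h2
    simp only [win, List.getElem_map, List.getElem_range, Nat.zero_add]
    rw [Nat.mod_eq_of_lt (show i < (q1 ++ q2).length by simp; omega)]
    rw [List.getD_eq_getElem?_getD, List.getElem?_append_left h2,
      List.getElem?_eq_getElem h2]
    rfl

lemma win_second (q1 q2 : List Int) :
    win (q1 ++ q2) q1.length ((q1 ++ q2).length - q1.length) = q2 := by
  have hlen : (q1 ++ q2).length - q1.length = q2.length := by simp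
  rw [hlen]
  apply List.ext_getElem
  · simp [win]
  · intro i h1 h2
    simp only [win, List.getElem_map, List.getElem_range]
    rw [Nat.mod_eq_of_lt (show q1.length + i < (q1 ++ q2).length by simp; omega)]
    rw [List.getD_eq_getElem?_getD, List.getElem?_append_right (by omega),
      Nat.add_sub_cancel_left, List.getElem?_eq_getElem h2]
    rfl

-- ===== VERDICT (by name: the statement is the Claim_ definition above) =====
theorem solution_spec : Claim_equal_solution := by
  intro queue1 queue2 _
  show solutionLoopA 1000000 queue1 queue2 queue1.sum queue2.sum 0
      = if queue1.length = 0 ∨ queue1.length = (queue1 ++ queue2).length then -1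
        else solutionLoopB (queue1 ++ queue2) (queue1 ++ queue2).length
          (queue1 ++ queue2).sum 1000000 0 queue1.length queue1.sum 0
  by_cases h0 : queue1.length = 0 ∨ queue1.length = (queue1 ++ queue2).length
  · rw [if_pos h0]
    rcases h0 with h0 | h0
    · rw [List.eq_nil_of_length_eq_zero h0, loopA_nil_left]
    · have hq2 : queue2 = [] := by
        apply List.eq_nil_of_length_eq_zero
        rw [List.length_append] at h0
        omega
      rw [hq2, loopA_nil_right]
  · rw [if_neg h0]
    obtain ⟨ha, hb⟩ := not_or.mp h0
    have h1 : 0 < queue1.length := by omega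
    have h2 : queue1.length < (queue1 ++ queue2).length := by
      rw [List.length_append]
      rcases Nat.lt_or_ge queue1.length (queue1.length + queue2.length) with h | h
      · exact h
      · exact absurd (by rw [List.length_append]; omega) hb
    have key := loop_eq (queue1 ++ queue2) (queue1 ++ queue2).sum 1000000 0
      queue1.length queue1.sum 0 h1 h2
    rw [Nat.zero_add, win_first, win_second] at key
    rw [show (queue1 ++ queue2).sum - queue1.sum = queue2.sum by
      rw [List.sum_append]; ring] at key
    exact key
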